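-- pv_equiv track=rewrite | github.com/SeseelLybon/Mastermind_Predictor | main.py | check_attempt
-- ===== SOURCE A (Python) =====
-- from typing import List
--
-- def check_attempt(attempt:List[int], mastermind_solution)->List[int]:
--
--     result:List[int] = []
--     #Some code that tests the current attempt for hits (number, location) and blows (number)
--     # 0 - miss
--     # 1 - blow (correct number, not correct location)
--     # 2 - hit (correct number, correct location)
--
--     for i in range(len(attempt)):
--         if attempt[i] == mastermind_solution[i]:
--             # if the right peg is in the right place
--             result.append(2)
--         elif attempt[i] in mastermind_solution:
--             # if the right peg is in the wrong place
--             result.append(1)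
--         else:
--             # if the wrong peg
--             result.append(0)
--     result.sort(reverse=True)
--
--     # Obscufate as the player can't know which exact one is blow or hit.
--     return result
-- ===== SOURCE B (Python) =====
-- def check_attempt(attempt, mastermind_solution):
--     solution_set = set(mastermind_solution)
--     hits = sum(a == s for a, s in zip(attempt, mastermind_solution))
--     present = sum(a in solution_set for a in attempt)
--     return [2] * hits + [1] * (present - hits) + [0] * (len(attempt) - present)
-- ===== Notes on version B (the rewrite author's own statement) =====
-- stated objective: faster
-- what changed: Replaces the classify-append-then-sort loop with arithmetic on two aggregate counts: hits = equal pairs of zip(attempt, solution), present = members of a prebuilt set (so blows = present - hits), and the descending result is emitted directly by replication with no sort and no inner list scan.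
import Mathlib
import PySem

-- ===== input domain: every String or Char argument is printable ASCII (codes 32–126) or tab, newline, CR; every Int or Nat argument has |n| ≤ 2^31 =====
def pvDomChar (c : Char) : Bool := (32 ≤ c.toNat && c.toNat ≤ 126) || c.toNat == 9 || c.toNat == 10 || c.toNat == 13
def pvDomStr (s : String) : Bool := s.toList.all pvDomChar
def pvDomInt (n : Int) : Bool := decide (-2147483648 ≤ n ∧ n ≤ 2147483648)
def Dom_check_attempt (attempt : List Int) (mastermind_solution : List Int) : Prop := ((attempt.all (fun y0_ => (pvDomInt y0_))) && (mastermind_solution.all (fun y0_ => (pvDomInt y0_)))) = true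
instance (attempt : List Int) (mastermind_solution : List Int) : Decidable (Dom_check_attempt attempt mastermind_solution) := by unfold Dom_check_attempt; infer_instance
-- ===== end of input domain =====

-- B replaces the per-position classify-append-sort with three-pass arithmetic: hits from zipped equality,
-- present (= hits + blows) from set membership, and the descending result built by replication — no sort.


-- ===== PORT A =====
def check_attempt (attempt : List Int) (mastermind_solution : List Int) : List Int :=
  let result : List Int := (PySem.List.pyRange 0 attempt.length 1).foldl
    (fun res i =>
      match PySem.List.pyGet? attempt i, PySem.List.pyGet? mastermind_solution i with
      | some a, some s =>
        res ++ [if a = s then 2 else if a ∈ mastermind_solution then 1 else 0]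
      | _, _ => res)  -- IndexError in Python; excluded by Pre_check_attempt
    []
  PySem.List.sorted result (fun x => x) true

-- ===== PORT B =====
def check_attempt_alt (attempt : List Int) (mastermind_solution : List Int) : List Int :=
  let solution_set : PySem.Set Int := PySem.Set.ofList mastermind_solution
  let hits : Int := (attempt.zip mastermind_solution).foldl
    (fun acc p => acc + if p.1 = p.2 then 1 else 0) 0
  let present : Int := attempt.foldl
    (fun acc a => acc + if a ∈ solution_set then 1 else 0) 0
  List.replicate hits.toNat 2 ++ List.replicate (present - hits).toNat 1 ++
    List.replicate ((attempt.length : Int) - present).toNat 0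

-- ===== PRECONDITION & SPEC =====
-- Pre_ excludes exactly the inputs where Python A raises IndexError (attempt longer than solution).
def Pre_check_attempt (attempt : List Int) (mastermind_solution : List Int) : Prop :=
  attempt.length ≤ mastermind_solution.length
instance (attempt : List Int) (mastermind_solution : List Int) : Decidable (Pre_check_attempt attempt mastermind_solution) := by unfold Pre_check_attempt; infer_instance
def pvWitness_check_attempt : List Int × List Int := ([1, 2], [2, 3])

def Spec_check_attempt (attempt : List Int) (mastermind_solution : List Int) (out : List Int) : Prop := out = check_attempt_alt attempt mastermind_solution
instance (attempt : List Int) (mastermind_solution : List Int) (out : List Int) : Decidable (Spec_check_attempt attempt mastermind_solution out) := by unfold Spec_check_attempt; infer_instance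

-- ===== CLAIM (what is proved, stated in full; the proofs are below) =====
def Claim_equal_check_attempt : Prop := ∀ (attempt : List Int) (mastermind_solution : List Int), Dom_check_attempt attempt mastermind_solution → Pre_check_attempt attempt mastermind_solution → Spec_check_attempt attempt mastermind_solution (check_attempt attempt mastermind_solution)

-- ===== LEMMAS AND PROOFS =====

-- the per-pair score of a mastermind position
def pvScore (sol : List Int) (p : Int × Int) : Int :=
  if p.1 = p.2 then 2 else if p.1 ∈ sol then 1 else 0

theorem pvScore_mem (sol : List Int) (p : Int × Int) :
    pvScore sol p = 0 ∨ pvScore sol p = 1 ∨ pvScore sol p = 2 := by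
  unfold pvScore; split_ifs <;> simp

-- A's loop builds exactly the scores of the zipped pairs (under Pre_)
theorem pvA_fold (attempt mastermind_solution : List Int)
    (h : attempt.length ≤ mastermind_solution.length) :
    (PySem.List.pyRange 0 attempt.length 1).foldl
      (fun res i =>
        match PySem.List.pyGet? attempt i, PySem.List.pyGet? mastermind_solution i with
        | some a, some s =>
          res ++ [if a = s then 2 else if a ∈ mastermind_solution then 1 else 0]
        | _, _ => res) ([] : List Int) =
    (attempt.zip mastermind_solution).map (pvScore mastermind_solution) := by
  rw [PySem.List.foldl_congr_mem _ _
      (fun res i => res ++ [pvScore mastermind_solution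
        (PySem.List.pyGetD attempt i 0, PySem.List.pyGetD mastermind_solution i 0)]) _ ?_]
  · rw [PySem.List.foldl_append_singleton_eq_map]
    simp only [List.nil_append]
    apply List.ext_getElem
    · simp [PySem.List.length_pyRange_one]; omega
    · intro k h1 h2
      simp only [List.getElem_map, PySem.List.getElem_pyRange_one, List.getElem_zip]
      have hk : k < attempt.length := by
        simpa [PySem.List.length_pyRange_one] using h1
      have hk2 : k < mastermind_solution.length := lt_of_lt_of_le hk h
      simp [PySem.List.pyGetD_natCast, hk, hk2]
  · intro acc i hi
    rw [PySem.List.mem_pyRange_one] at hi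
    have h1 : i.toNat < attempt.length := by omega
    have h2 : i.toNat < mastermind_solution.length := by omega
    rw [PySem.List.pyGet?_of_nonneg _ hi.1, PySem.List.pyGet?_of_nonneg _ hi.1,
        List.getElem?_eq_getElem h1, List.getElem?_eq_getElem h2]
    simp [pvScore, PySem.List.pyGetD_of_nonneg _ _ hi.1,
      List.getElem?_eq_getElem h1, List.getElem?_eq_getElem h2]

-- reverse-sorting a list of 0/1/2 values lays out its counts descending
theorem pvSorted_canon (S : List Int) (hS : ∀ x ∈ S, x = 0 ∨ x = 1 ∨ x = 2) :
    PySem.List.sorted S (fun x => x) true =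
    List.replicate (S.count 2) 2 ++ List.replicate (S.count 1) 1 ++ List.replicate (S.count 0) 0 := by
  set C := List.replicate (S.count 2) (2 : Int) ++ List.replicate (S.count 1) 1 ++ List.replicate (S.count 0) 0 with hC
  have hperm : C.Perm S := by
    rw [List.perm_iff_count]
    intro a
    by_cases h2 : a = 2 <;> by_cases h1 : a = 1 <;> by_cases h0 : a = 0 <;>
      simp_all [List.count_append, List.count_replicate]
    have ha : a ∉ S := fun hmem => by rcases hS a hmem with h | h | h <;> simp_all
    rw [if_neg (fun hh => h2 hh.symm), if_neg (fun hh => h1 hh.symm), if_neg (fun hh => h0 hh.symm)]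
    simp [List.count_eq_zero.mpr ha]
  have hpair : C.Pairwise (fun a b : Int => b ≤ a) := by
    rw [hC]
    rw [List.pairwise_append, List.pairwise_append]
    refine ⟨⟨?_, ?_, ?_⟩, ?_, ?_⟩ <;>
      simp [List.pairwise_replicate, List.mem_replicate, List.mem_append] <;>
      intros <;> omega
  exact List.eq_of_perm_of_sorted (fun a b _ _ hab hba => le_antisymm hba hab)
    (PySem.List.sorted_pairwise_rev S (fun x => x)) hpair
    ((PySem.List.sorted_perm S (fun x => x) true).trans hperm.symm)

theorem pvCount_sum (S : List Int) (hS : ∀ x ∈ S, x = 0 ∨ x = 1 ∨ x = 2) :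
    S.count 0 + S.count 1 + S.count 2 = S.length := by
  induction S with
  | nil => simp
  | cons x t ih =>
    have hx := hS x (by simp)
    have ht := ih (fun y hy => hS y (by simp [hy]))
    rcases hx with h | h | h <;> subst h <;> simp at * <;> omega

-- B's hits loop counts the pairs scoring 2
theorem pvHits (attempt sol : List Int) :
    (attempt.zip sol).foldl (fun acc p => acc + if p.1 = p.2 then 1 else 0) (0 : Int) =
    (((attempt.zip sol).map (pvScore sol)).count 2 : Int) := by
  induction attempt.zip sol with
  | nil => simp
  | cons p t ih =>
    have step : ∀ (a : Int), (p :: t).foldl (fun acc q => acc + if q.1 = q.2 then 1 else 0) a =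
        a + (if p.1 = p.2 then 1 else 0) + t.foldl (fun acc q => acc + if q.1 = q.2 then 1 else 0) 0 := by
      intro a
      rw [List.foldl_cons, PySem.List.foldl_add, PySem.List.foldl_add (a := 0)]
      ring
    rw [step, zero_add, ih]
    simp only [List.map_cons, List.count_cons]
    unfold pvScore
    split_ifs <;> simp_all <;> omega

-- helper: the membership count over zipped pairs splits into score-2 and score-1 counts
theorem pvPresent_aux (sol : List Int) (T : List (Int × Int)) (hmem : ∀ p ∈ T, p.2 ∈ sol) :
    (T.map Prod.fst).foldl (fun acc a => acc + if a ∈ PySem.Set.ofList sol then 1 else 0) (0 : Int) =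
    ((T.map (pvScore sol)).count 2 : Int) + ((T.map (pvScore sol)).count 1 : Int) := by
  induction T with
  | nil => simp
  | cons p t ih =>
    have hp2 : p.2 ∈ sol := hmem p (by simp)
    have step : ∀ (a : Int), ((p :: t).map Prod.fst).foldl
        (fun acc x => acc + if x ∈ PySem.Set.ofList sol then 1 else 0) a =
        a + (if p.1 ∈ PySem.Set.ofList sol then 1 else 0) +
        (t.map Prod.fst).foldl (fun acc x => acc + if x ∈ PySem.Set.ofList sol then 1 else 0) 0 := by
      intro a
      rw [List.map_cons, List.foldl_cons, PySem.List.foldl_add, PySem.List.foldl_add (a := 0)]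
      ring
    rw [step, zero_add, ih (fun q hq => hmem q (by simp [hq]))]
    simp only [List.map_cons, List.count_cons]
    unfold pvScore
    by_cases he : p.1 = p.2
    · have hin : p.1 ∈ sol := he ▸ hp2
      simp [he, PySem.Set.mem_ofList, hp2]
      ring
    · by_cases hin : p.1 ∈ sol
      · simp [he, PySem.Set.mem_ofList, hin]; omega
      · simp [he, PySem.Set.mem_ofList, hin]

-- B's present loop counts the pairs scoring 1 or 2 (under Pre_)
theorem pvPresent (attempt sol : List Int) (h : attempt.length ≤ sol.length) :
    attempt.foldl (fun acc a => acc + if a ∈ PySem.Set.ofList sol then 1 else 0) (0 : Int) =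
    (((attempt.zip sol).map (pvScore sol)).count 2 : Int) +
    (((attempt.zip sol).map (pvScore sol)).count 1 : Int) := by
  have hfst : (attempt.zip sol).map Prod.fst = attempt := List.map_fst_zip h
  have haux := pvPresent_aux sol (attempt.zip sol) (fun p hp => (List.of_mem_zip hp).2)
  rwa [hfst] at haux

-- ===== VERDICT (by name: the statement is the Claim_ definition above) =====
theorem check_attempt_spec : Claim_equal_check_attempt := by
  intro attempt mastermind_solution _ hpre
  unfold Spec_check_attempt check_attempt check_attempt_alt
  have hlen : attempt.length ≤ mastermind_solution.length := hpre
  simp only [pvA_fold attempt mastermind_solution hlen, pvHits attempt mastermind_solution,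
    pvPresent attempt mastermind_solution hlen]
  set S := (attempt.zip mastermind_solution).map (pvScore mastermind_solution) with hSdef
  have hS : ∀ x ∈ S, x = 0 ∨ x = 1 ∨ x = 2 := by
    intro x hx
    obtain ⟨p, _, rfl⟩ := List.mem_map.mp hx
    exact pvScore_mem mastermind_solution p
  have hlenS : S.length = attempt.length := by
    simp [hSdef, List.length_zip, Nat.min_eq_left hlen]
  have hsum := pvCount_sum S hS
  rw [pvSorted_canon S hS]
  have h2 : ((S.count 2 : Int)).toNat = S.count 2 := by simp
  have h1 : ((S.count 2 : Int) + (S.count 1 : Int) - (S.count 2 : Int)).toNat = S.count 1 := by omega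
  have h0 : ((attempt.length : Int) - ((S.count 2 : Int) + (S.count 1 : Int))).toNat = S.count 0 := by omega
  rw [h2, h1, h0]
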